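-- pv_equiv track=rewrite | github.com/Sudip241999/Leetcode | striverHashingBasics.py | highestAndLowestFrequencyElements
-- ===== SOURCE A (Python) =====
-- def highestAndLowestFrequencyElements(hashmap):
--
--     temp=hashmap.values()
--
--     high=max(temp)
--     low=min(temp)
--
--     maxElement=[]
--     minElement=[]
--
--     for i in hashmap:
--         if hashmap[i]==high:
--             maxElement.append(i)
--         elif hashmap[i]==low:
--             minElement.append(i)
--
--     return maxElement,minElement
-- ===== SOURCE B (Python) =====
-- def highestAndLowestFrequencyElements(hashmap):
--     # Inverse index: frequency value -> keys with that value, built in one pass.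
--     index = {}
--     for key, value in hashmap.items():
--         index.setdefault(value, []).append(key)
--     vals = hashmap.values()
--     high = max(vals)
--     low = min(vals)
--     return index[high], ([] if high == low else index[low])
-- ===== Notes on version B (the rewrite author's own statement) =====
-- stated objective: alternative
-- what changed: B builds an inverse index (frequency -> keys) in one pass and looks up the max/min frequency in it, instead of A's scan that re-looks up hashmap[i] for every key and compares against high/low; the elif corner (high==low gives empty minElement) is handled by one explicit guard.
import Mathlib
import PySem

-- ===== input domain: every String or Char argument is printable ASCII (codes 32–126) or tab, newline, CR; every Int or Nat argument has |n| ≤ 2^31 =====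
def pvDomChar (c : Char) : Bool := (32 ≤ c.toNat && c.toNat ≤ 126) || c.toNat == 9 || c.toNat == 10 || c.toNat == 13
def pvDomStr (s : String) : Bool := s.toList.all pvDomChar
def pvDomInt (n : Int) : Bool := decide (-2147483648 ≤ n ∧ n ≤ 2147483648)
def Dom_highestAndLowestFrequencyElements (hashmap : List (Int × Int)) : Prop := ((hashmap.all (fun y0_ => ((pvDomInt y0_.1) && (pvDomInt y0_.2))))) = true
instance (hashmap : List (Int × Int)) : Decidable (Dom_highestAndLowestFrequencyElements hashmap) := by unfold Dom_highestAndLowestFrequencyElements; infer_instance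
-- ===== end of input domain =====

-- B replaces A's per-key lookup-and-compare scan with a one-pass inverse index
-- (frequency -> keys) looked up at the max/min frequency (objective: alternative).

-- ===== PORT A =====
-- literal port: temp = hashmap.values(); high = max(temp); low = min(temp);
-- for i in hashmap: look i up in the dict and compare against high / low.
-- max/min on an empty dict raise ValueError: excluded by Pre_ (the none branch is unreachable there).
def highestAndLowestFrequencyElements (hashmap : List (Int × Int)) : List Int × List Int :=
  let d := PySem.Dict.mk hashmap
  let temp := d.values
  match PySem.List.max? temp (fun x => x), PySem.List.min? temp (fun x => x) with
  | some high, some low =>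
      d.keys.foldl (fun acc i =>
        if (d.get? i).getD 0 = high then (acc.1 ++ [i], acc.2)
        else if (d.get? i).getD 0 = low then (acc.1, acc.2 ++ [i])
        else acc) ([], [])
  | _, _ => ([], [])

-- ===== PORT B =====
-- literal port of Source B: index = {}; for key, value in items: index.setdefault(value, []).append(key);
-- then max/min of the values and two index lookups.
def highestAndLowestFrequencyElements_alt (hashmap : List (Int × Int)) : List Int × List Int :=
  let index := hashmap.foldl (fun d p => d.modify p.2 [] (fun l => l ++ [p.1]))
    (PySem.Dict.empty : PySem.Dict Int (List Int))
  let vals := (PySem.Dict.mk hashmap).values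
  match PySem.List.max? vals (fun x => x) with
  | none => ([], [])
  | some high =>
      match PySem.List.min? vals (fun x => x) with
      | none => ([], [])
      | some low => (index.getD high [], if high == low then [] else index.getD low [])

-- ===== PRECONDITION & SPEC =====
-- Pre_ excludes the empty dict (max()/min() raise ValueError there) and association lists
-- with duplicate keys, which do not represent a Python dict (dict keys are unique).
def Pre_highestAndLowestFrequencyElements (hashmap : List (Int × Int)) : Prop :=
  hashmap ≠ [] ∧ (hashmap.map Prod.fst).Nodup
instance (hashmap : List (Int × Int)) : Decidable (Pre_highestAndLowestFrequencyElements hashmap) := by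
  unfold Pre_highestAndLowestFrequencyElements; infer_instance
def pvWitness_highestAndLowestFrequencyElements : (List (Int × Int)) := [(1, 2), (2, 2), (3, 1)]
def Spec_highestAndLowestFrequencyElements (hashmap : List (Int × Int)) (out : List Int × List Int) : Prop := out = highestAndLowestFrequencyElements_alt hashmap
instance (hashmap : List (Int × Int)) (out : List Int × List Int) : Decidable (Spec_highestAndLowestFrequencyElements hashmap out) := by unfold Spec_highestAndLowestFrequencyElements; infer_instance

-- ===== CLAIM (what is proved, stated in full; the proofs are below) =====
def Claim_equal_highestAndLowestFrequencyElements : Prop := ∀ (hashmap : List (Int × Int)), Dom_highestAndLowestFrequencyElements hashmap → Pre_highestAndLowestFrequencyElements hashmap → Spec_highestAndLowestFrequencyElements hashmap (highestAndLowestFrequencyElements hashmap)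

-- ===== LEMMAS AND PROOFS =====

-- With unique keys, looking a pair's key up in the whole dict returns that pair's value.
theorem pvGetOfMem (l : List (Int × Int)) (hnd : (l.map Prod.fst).Nodup)
    (p : Int × Int) (hp : p ∈ l) : (PySem.Dict.mk l).get? p.1 = some p.2 := by
  apply PySem.Dict.get?_of_mem_items
  · simpa [PySem.Dict.items] using hp
  · simpa [PySem.Dict.keys, PySem.Dict.items] using hnd

-- A loop with two independent accumulators splits into two loops.
theorem pvSplitFold (l : List (Int × Int)) (high low : Int) :
    ∀ (a b : List Int),
    l.foldl (fun acc p =>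
        if p.2 = high then (acc.1 ++ [p.1], acc.2)
        else if p.2 = low then (acc.1, acc.2 ++ [p.1])
        else acc) (a, b)
      = (l.foldl (fun a p => if p.2 = high then a ++ [p.1] else a) a,
         l.foldl (fun b p => if p.2 ≠ high ∧ p.2 = low then b ++ [p.1] else b) b) := by
  induction l with
  | nil => intro a b; rfl
  | cons p t ih =>
      intro a b
      simp only [List.foldl_cons]
      by_cases h1 : p.2 = high
      · simp [h1, ih]
      · by_cases h2 : p.2 = low
        · have h3 : ¬ low = high := fun h => h1 (h2.trans h)
          simp [h2, h3, ih]
        · simp [h1, h2, ih]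

-- The inverse-index loop, looked up at f, collects the keys whose value equals f, in order.
theorem pvIndexGetD (l : List (Int × Int)) (f : Int) :
    ∀ (d : PySem.Dict Int (List Int)),
    (l.foldl (fun d p => d.modify p.2 [] (fun l => l ++ [p.1])) d).getD f []
      = d.getD f [] ++ (l.filter (fun p => p.2 == f)).map Prod.fst := by
  induction l with
  | nil => intro d; simp
  | cons p t ih =>
      intro d
      simp only [List.foldl_cons, ih, List.filter_cons]
      by_cases h : p.2 = f
      · simp [h, PySem.Dict.getD_modify_self]
      · have := PySem.Dict.getD_modify_of_ne (d := d) (k := p.2) (k' := f)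
          (d0 := ([] : List Int)) (f := fun l => l ++ [p.1]) (Ne.symm h)
        simp [h, this]

theorem highestAndLowestFrequencyElements_spec' :
    ∀ (hashmap : List (Int × Int)), Pre_highestAndLowestFrequencyElements hashmap →
    highestAndLowestFrequencyElements hashmap = highestAndLowestFrequencyElements_alt hashmap := by
  intro l hpre
  obtain ⟨hne, hnd⟩ := hpre
  unfold highestAndLowestFrequencyElements highestAndLowestFrequencyElements_alt
  have hvals : (PySem.Dict.mk l).values = l.map Prod.snd := by
    simp [PySem.Dict.values]
  have hvne : (PySem.Dict.mk l).values ≠ [] := by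
    simp [hvals, hne]
  obtain ⟨high, hhigh⟩ : ∃ h, PySem.List.max? (PySem.Dict.mk l).values (fun x => x) = some h := by
    cases hmx : PySem.List.max? (PySem.Dict.mk l).values (fun x => x) with
    | none => exact absurd (((PySem.List.max?_eq_none_iff _ _).mp hmx)) hvne
    | some h => exact ⟨h, rfl⟩
  obtain ⟨low, hlow⟩ : ∃ h, PySem.List.min? (PySem.Dict.mk l).values (fun x => x) = some h := by
    cases hmn : PySem.List.min? (PySem.Dict.mk l).values (fun x => x) with
    | none => exact absurd (((PySem.List.min?_eq_none_iff _ _).mp hmn)) hvne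
    | some h => exact ⟨h, rfl⟩
  simp only [hhigh, hlow]
  -- A's loop over keys = a loop over the pairs, using each pair's own value
  have hkeys : (PySem.Dict.mk l).keys = l.map Prod.fst := by
    simp [PySem.Dict.keys]
  rw [hkeys, List.foldl_map]
  have hcongr : l.foldl (fun (acc : List Int × List Int) p =>
        if ((PySem.Dict.mk l).get? p.1).getD 0 = high then (acc.1 ++ [p.1], acc.2)
        else if ((PySem.Dict.mk l).get? p.1).getD 0 = low then (acc.1, acc.2 ++ [p.1])
        else acc) ([], [])
      = l.foldl (fun (acc : List Int × List Int) p =>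
        if p.2 = high then (acc.1 ++ [p.1], acc.2)
        else if p.2 = low then (acc.1, acc.2 ++ [p.1])
        else acc) ([], []) := by
    apply PySem.List.foldl_congr_mem
    intro acc p hp
    rw [pvGetOfMem l hnd p hp]
    rfl
  rw [hcongr, pvSplitFold]
  rw [pvIndexGetD]
  -- first components agree
  have h1 : l.foldl (fun a p => if p.2 = high then a ++ [p.1] else a) []
      = (l.filter (fun p => p.2 == high)).map Prod.fst := by
    have := PySem.List.foldl_append_ite (l := l) (p := fun p => p.2 = high)
      (f := Prod.fst) (acc := ([] : List Int))
    simpa using this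
  -- second components agree, by cases on high = low
  have h2 : l.foldl (fun b p => if p.2 ≠ high ∧ p.2 = low then b ++ [p.1] else b) []
      = (if (high == low) = true then ([] : List Int)
         else (l.foldl (fun d p => d.modify p.2 [] (fun l => l ++ [p.1]))
            (PySem.Dict.empty : PySem.Dict Int (List Int))).getD low []) := by
    by_cases heq : high = low
    · subst heq
      simp only [beq_self_eq_true, if_true]
      have : l.foldl (fun b p => if p.2 ≠ high ∧ p.2 = high then b ++ [p.1] else b) []
          = l.foldl (fun b _ => b) [] := by
        apply PySem.List.foldl_congr_mem
        intro acc p _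
        simp
      rw [this]
      simp
    · rw [pvIndexGetD]
      simp only [beq_iff_eq, heq, if_false]
      have : l.foldl (fun b p => if p.2 ≠ high ∧ p.2 = low then b ++ [p.1] else b) []
          = l.foldl (fun b p => if p.2 = low then b ++ [p.1] else b) [] := by
        apply PySem.List.foldl_congr_mem
        intro acc p _
        by_cases hl : p.2 = low
        · have h3 : ¬ low = high := fun h => heq h.symm
          simp [hl, h3]
        · simp [hl]
      rw [this]
      have := PySem.List.foldl_append_ite (l := l) (p := fun p => p.2 = low)
        (f := Prod.fst) (acc := ([] : List Int))
      simpa using this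
  rw [h1, h2, pvIndexGetD]
  simp

-- ===== VERDICT (by name: the statement is the Claim_ definition above) =====
theorem highestAndLowestFrequencyElements_spec : Claim_equal_highestAndLowestFrequencyElements := by
  intro l _ hpre
  exact (highestAndLowestFrequencyElements_spec' l hpre).symm ▸ rfl
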